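-- pv_equiv track=rewrite | github.com/austencloud/tka-studio | src/shared/application/services/layout/component_position_calculator.py | _calculate_flow_layout
-- ===== SOURCE A (Python) =====
-- from typing import Any
--
-- def _calculate_flow_layout(
--     components: dict[str, Any], container_size: tuple[int, int]
-- ) -> dict[str, tuple[int, int]]:
--     """Calculate flow layout for components."""
--     positions = {}
--     current_x = 10
--     current_y = 10
--     row_height = 0
--     container_width = container_size[0]
--
--     for name, config in components.items():
--         width = config.get("width", 100)
--         height = config.get("height", 100)
--
--         # Check if component fits in current row
--         if current_x + width > container_width - 10:
--             # Move to next row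
--             current_x = 10
--             current_y += row_height + 10
--             row_height = 0
--
--         positions[name] = (current_x, current_y)
--         current_x += width + 10
--         row_height = max(row_height, height)
--
--     return positions
-- ===== SOURCE B (Python) =====
-- def _calculate_flow_layout(components, container_size):
--     """Two-pass flow layout: first break components into rows (tracking each
--     row's height), then emit coordinates row by row."""
--     container_width = container_size[0]
--     rows = []          # list of (list of (name, width), row_height)
--     cur_items = []
--     cur_h = 0
--     cur_x = 10
--     for name, config in components.items():
--         w = config.get("width", 100)
--         h = config.get("height", 100)
--         if cur_x + w > container_width - 10:
--             rows.append((cur_items, cur_h))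
--             cur_items = []
--             cur_h = 0
--             cur_x = 10
--         cur_items.append((name, w))
--         cur_h = max(cur_h, h)
--         cur_x += w + 10
--     rows.append((cur_items, cur_h))
--
--     positions = {}
--     y = 10
--     for items, row_h in rows:
--         x = 10
--         for name, w in items:
--             positions[name] = (x, y)
--             x += w + 10
--         y += row_h + 10
--     return positions
-- ===== Notes on version B (the rewrite author's own statement) =====
-- stated objective: alternative
-- what changed: A interleaves row-breaking and coordinate assignment in one loop over four mutable scalars; B is two differently-shaped passes: pass 1 partitions the components into a list of rows (each with its max height), pass 2 walks the rows emitting (x,y) positions from running offsets.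
import Mathlib
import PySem

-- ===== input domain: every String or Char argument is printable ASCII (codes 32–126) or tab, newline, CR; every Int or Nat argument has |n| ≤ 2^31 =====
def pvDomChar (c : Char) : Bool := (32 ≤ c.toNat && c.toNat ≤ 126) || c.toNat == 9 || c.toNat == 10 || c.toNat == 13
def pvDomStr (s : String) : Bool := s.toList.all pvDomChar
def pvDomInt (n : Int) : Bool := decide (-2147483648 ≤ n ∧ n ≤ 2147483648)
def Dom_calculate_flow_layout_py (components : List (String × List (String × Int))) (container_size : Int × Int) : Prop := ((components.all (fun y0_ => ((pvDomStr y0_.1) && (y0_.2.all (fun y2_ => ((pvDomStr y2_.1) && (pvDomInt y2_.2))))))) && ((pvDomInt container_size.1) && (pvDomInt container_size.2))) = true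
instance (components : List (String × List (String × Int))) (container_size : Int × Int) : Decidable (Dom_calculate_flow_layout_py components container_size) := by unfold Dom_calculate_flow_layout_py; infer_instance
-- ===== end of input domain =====

-- B replaces A's single stateful loop by two passes (break into rows, then emit
-- coordinates); same cost, a different decomposition ("alternative").

-- ===== PORT A =====
-- A's loop: state = (positions dict, current_x, current_y, row_height)
def goA (W : Int) : List (String × List (String × Int)) → PySem.Dict String (Int × Int) → Int → Int → Int → PySem.Dict String (Int × Int)
  | [], pos, _, _, _ => pos
  | (n, cfg) :: t, pos, cx, cy, rh =>
    let w := (PySem.Dict.mk cfg).getD "width" 100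
    let h := (PySem.Dict.mk cfg).getD "height" 100
    if cx + w > W - 10 then
      goA W t (pos.insert n (10, cy + (rh + 10))) (10 + (w + 10)) (cy + (rh + 10)) (max 0 h)
    else
      goA W t (pos.insert n (cx, cy)) (cx + (w + 10)) cy (max rh h)

def calculate_flow_layout_py (components : List (String × List (String × Int))) (container_size : Int × Int) : List (String × Int × Int) :=
  (goA container_size.1 components PySem.Dict.empty 10 10 0).items

-- ===== PORT B =====
-- pass 1: break the components into rows; each row = (its (name, width) items, its height)
def buildRowsB (W : Int) : List (String × List (String × Int)) → List (String × Int) → Int → Int → List ((List (String × Int)) × Int)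
  | [], cur, ch, _ => [(cur, ch)]
  | (n, cfg) :: t, cur, ch, cx =>
    let w := (PySem.Dict.mk cfg).getD "width" 100
    let h := (PySem.Dict.mk cfg).getD "height" 100
    if cx + w > W - 10 then
      (cur, ch) :: buildRowsB W t [(n, w)] (max 0 h) (10 + (w + 10))
    else
      buildRowsB W t (cur ++ [(n, w)]) (max ch h) (cx + (w + 10))

-- pass 2, inner loop: emit one row's positions into the dict
def emitRowB : List (String × Int) → PySem.Dict String (Int × Int) → Int → Int → PySem.Dict String (Int × Int)
  | [], pos, _, _ => pos
  | (n, w) :: t, pos, x, y => emitRowB t (pos.insert n (x, y)) (x + (w + 10)) y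

-- pass 2, outer loop: walk the rows with a running y offset
def emitRowsB : List ((List (String × Int)) × Int) → PySem.Dict String (Int × Int) → Int → PySem.Dict String (Int × Int)
  | [], pos, _ => pos
  | (r, rh) :: rs, pos, y => emitRowsB rs (emitRowB r pos 10 y) (y + (rh + 10))

def calculate_flow_layout_py_alt (components : List (String × List (String × Int))) (container_size : Int × Int) : List (String × Int × Int) :=
  (emitRowsB (buildRowsB container_size.1 components [] 0 10) PySem.Dict.empty 10).items

-- ===== PRECONDITION & SPEC =====
def Spec_calculate_flow_layout_py (components : List (String × List (String × Int))) (container_size : Int × Int) (out : List (String × Int × Int)) : Prop := out = calculate_flow_layout_py_alt components container_size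
instance (components : List (String × List (String × Int))) (container_size : Int × Int) (out : List (String × Int × Int)) : Decidable (Spec_calculate_flow_layout_py components container_size out) := by unfold Spec_calculate_flow_layout_py; infer_instance

-- ===== CLAIM (what is proved, stated in full; the proofs are below) =====
def Claim_equal_calculate_flow_layout_py : Prop := ∀ (components : List (String × List (String × Int))) (container_size : Int × Int), Dom_calculate_flow_layout_py components container_size → Spec_calculate_flow_layout_py components container_size (calculate_flow_layout_py components container_size)

-- ===== LEMMAS AND PROOFS =====

-- the pure sequence of (name, position) assignments A's loop performs
def assignsA (W : Int) : List (String × List (String × Int)) → Int → Int → Int → List (String × Int × Int)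
  | [], _, _, _ => []
  | (n, cfg) :: t, cx, cy, rh =>
    let w := (PySem.Dict.mk cfg).getD "width" 100
    let h := (PySem.Dict.mk cfg).getD "height" 100
    if cx + w > W - 10 then
      (n, 10, cy + (rh + 10)) :: assignsA W t (10 + (w + 10)) (cy + (rh + 10)) (max 0 h)
    else
      (n, cx, cy) :: assignsA W t (cx + (w + 10)) cy (max rh h)

-- the pure sequence of assignments B's second pass performs
def emitRowP : List (String × Int) → Int → Int → List (String × Int × Int)
  | [], _, _ => []
  | (n, w) :: t, x, y => (n, x, y) :: emitRowP t (x + (w + 10)) y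

def emitRowsP : List ((List (String × Int)) × Int) → Int → List (String × Int × Int)
  | [], _ => []
  | (r, rh) :: rs, y => emitRowP r 10 y ++ emitRowsP rs (y + (rh + 10))

def rowEndFrom (x : Int) (r : List (String × Int)) : Int := r.foldl (fun a e => a + (e.2 + 10)) x

theorem goA_eq_foldl (W : Int) : ∀ (t : List (String × List (String × Int))) (pos : PySem.Dict String (Int × Int)) (cx cy rh : Int),
    goA W t pos cx cy rh = (assignsA W t cx cy rh).foldl (fun d e => d.insert e.1 e.2) pos := by
  intro t
  induction t with
  | nil => intro pos cx cy rh; rfl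
  | cons p t ih =>
    intro pos cx cy rh
    obtain ⟨n, cfg⟩ := p
    simp only [goA, assignsA]
    split_ifs <;> simp [ih, List.foldl]

theorem emitRowB_eq_foldl : ∀ (r : List (String × Int)) (pos : PySem.Dict String (Int × Int)) (x y : Int),
    emitRowB r pos x y = (emitRowP r x y).foldl (fun d e => d.insert e.1 e.2) pos := by
  intro r
  induction r with
  | nil => intro pos x y; rfl
  | cons p t ih =>
    intro pos x y
    obtain ⟨n, w⟩ := p
    simp [emitRowB, emitRowP, ih]

theorem emitRowsB_eq_foldl : ∀ (rs : List ((List (String × Int)) × Int)) (pos : PySem.Dict String (Int × Int)) (y : Int),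
    emitRowsB rs pos y = (emitRowsP rs y).foldl (fun d e => d.insert e.1 e.2) pos := by
  intro rs
  induction rs with
  | nil => intro pos y; rfl
  | cons p rs ih =>
    intro pos y
    obtain ⟨r, rh⟩ := p
    simp [emitRowsB, emitRowsP, ih, emitRowB_eq_foldl, List.foldl_append]

theorem emitRowP_append (n : String) (w : Int) : ∀ (r : List (String × Int)) (x y : Int),
    emitRowP (r ++ [(n, w)]) x y = emitRowP r x y ++ [(n, rowEndFrom x r, y)] := by
  intro r
  induction r with
  | nil => intro x y; rfl
  | cons p t ih =>
    intro x y
    obtain ⟨m, v⟩ := p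
    simp [emitRowP, ih, rowEndFrom, List.foldl]

theorem rowEndFrom_append (x : Int) (r : List (String × Int)) (n : String) (w : Int) :
    rowEndFrom x (r ++ [(n, w)]) = rowEndFrom x r + (w + 10) := by
  simp [rowEndFrom, List.foldl_append]

-- core: A's remaining assignments, appended after the current row's already-emitted
-- ones, are exactly B's emission of the rows B builds from the same state
theorem core (W : Int) : ∀ (t : List (String × List (String × Int))) (cur : List (String × Int)) (ch cy : Int),
    emitRowP cur 10 cy ++ assignsA W t (rowEndFrom 10 cur) cy ch
      = emitRowsP (buildRowsB W t cur ch (rowEndFrom 10 cur)) cy := by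
  intro t
  induction t with
  | nil =>
    intro cur ch cy
    simp [assignsA, buildRowsB, emitRowsP]
  | cons p t ih =>
    intro cur ch cy
    obtain ⟨n, cfg⟩ := p
    simp only [assignsA, buildRowsB]
    split_ifs with hw
    · -- wrap: close the current row, start a fresh one with this component
      have h2 := ih [(n, (PySem.Dict.mk cfg).getD "width" 100)] (max 0 ((PySem.Dict.mk cfg).getD "height" 100)) (cy + (ch + 10))
      simp only [emitRowP, rowEndFrom, List.foldl] at h2
      simp only [emitRowsP]
      rw [← h2]
      simp
    · -- no wrap: extend the current row
      rw [← rowEndFrom_append, ← ih (cur ++ [(n, (PySem.Dict.mk cfg).getD "width" 100)]) (max ch ((PySem.Dict.mk cfg).getD "height" 100)) cy]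
      rw [rowEndFrom_append, emitRowP_append]
      simp

-- ===== VERDICT (by name: the statement is the Claim_ definition above) =====
theorem calculate_flow_layout_py_spec : Claim_equal_calculate_flow_layout_py := by
  intro components container_size _
  unfold Spec_calculate_flow_layout_py calculate_flow_layout_py calculate_flow_layout_py_alt
  rw [goA_eq_foldl, emitRowsB_eq_foldl]
  have h := core container_size.1 components [] 0 10
  simp only [emitRowP, List.nil_append] at h
  rw [show rowEndFrom 10 ([] : List (String × Int)) = 10 from rfl] at h
  rw [h]
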